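-- pv_equiv track=rewrite | github.com/mewfree/advent-of-meow-2016 | day-07/day-07.py | supportsTLS
-- ===== SOURCE A (Python) =====
-- def supportsTLS(inside_brackets, outside_brackets):
--     for string in inside_brackets:
--         if hasABBA(string):
--             return False
--
--     for string in outside_brackets:
--         if hasABBA(string):
--             return True
--
--     return False
--
-- def hasABBA(string):
--     strlist = list(string)
--     for i in range(0, len(strlist)):
--         if i > 0 and i < len(strlist)-2:
--             if strlist[i] == strlist[i+1] and strlist[i-1] == strlist[i+2]:
--                 if strlist[i] != strlist[i-1]:
--                     return True
-- ===== SOURCE B (Python) =====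
-- import re
--
-- # ABBA = a char, a different char, then the same two back-to-front.
-- # The backreference pattern finds it directly; DOTALL so '.' matches newlines too,
-- # since A accepts any characters.
-- _ABBA = re.compile(r'(.)(?!\1)(.)\2\1', re.DOTALL)
--
-- def supportsTLS(inside_brackets, outside_brackets):
--     return (not any(_ABBA.search(s) for s in inside_brackets)
--             and any(_ABBA.search(s) for s in outside_brackets))
-- ===== Notes on version B (the rewrite author's own statement) =====
-- stated objective: idiomatic
-- what changed: hasABBA's manual index loop with boundary guards is replaced by a compiled backreference regex r'(.)(?!\1)(.)\2\1' (DOTALL) searched over each string, and the two early-return loops of supportsTLS by a single not-any/any expression.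
import Mathlib
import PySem

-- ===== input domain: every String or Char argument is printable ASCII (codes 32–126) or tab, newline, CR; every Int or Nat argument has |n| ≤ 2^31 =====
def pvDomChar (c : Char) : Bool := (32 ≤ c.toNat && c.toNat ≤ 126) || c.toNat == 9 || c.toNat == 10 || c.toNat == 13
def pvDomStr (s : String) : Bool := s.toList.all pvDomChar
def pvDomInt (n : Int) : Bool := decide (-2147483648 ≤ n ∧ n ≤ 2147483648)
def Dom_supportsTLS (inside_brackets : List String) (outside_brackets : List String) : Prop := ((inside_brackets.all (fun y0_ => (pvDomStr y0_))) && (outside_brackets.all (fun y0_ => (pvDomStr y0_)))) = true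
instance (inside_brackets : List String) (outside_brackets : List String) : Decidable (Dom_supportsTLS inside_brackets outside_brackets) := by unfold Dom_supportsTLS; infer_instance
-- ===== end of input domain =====

-- B replaces A's manual index loop by a backreference-regex search (ported as the regex
-- engine's left-to-right attempt over suffixes) and the early-return loops by not-any/any.

-- ===== PORT A =====
-- hasABBA's index loop: for i in range(0, len): if i>0 and i<len-2 and <checks>: return True
def hasABBA_loop (l : List Char) (i : Nat) : Bool :=
  if i < l.length then
    if (decide (0 < i) && decide (i < l.length - 2)) &&
       ((l.getD i ' ' == l.getD (i+1) ' ') && (l.getD (i-1) ' ' == l.getD (i+2) ' ') &&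
        !(l.getD i ' ' == l.getD (i-1) ' ')) then
      true
    else hasABBA_loop l (i+1)
  else false  -- Python falls off the loop and returns None (falsy)
termination_by l.length - i

def hasABBA_A (s : String) : Bool := hasABBA_loop s.toList 0

-- second loop of supportsTLS: for string in outside_brackets: if hasABBA(string): return True; return False
def tlsOutLoop : List String → Bool
  | [] => false
  | s :: rest => if hasABBA_A s then true else tlsOutLoop rest

def supportsTLS (inside_brackets : List String) (outside_brackets : List String) : Bool :=
  match inside_brackets with
  | [] => tlsOutLoop outside_brackets
  | s :: rest => if hasABBA_A s then false else supportsTLS rest outside_brackets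

-- ===== PORT B =====
-- re.search with pattern (.)(?!\1)(.)\2\1 (DOTALL): the engine attempts a match at each
-- start position left to right; at a position it matches iff the next four chars are
-- a, b with b ≠ a (the lookahead), then b again (\2), then a (\1). Ported by hand,
-- exactly that semantics: recursion over the suffixes, testing the 4-char prefix.
def reSearchABBA : List Char → Bool
  | a :: b :: c :: d :: tl =>
      if (!(a == b)) && (b == c) && (a == d) then true
      else reSearchABBA (b :: c :: d :: tl)
  | _ => false

def hasABBA_B (s : String) : Bool := reSearchABBA s.toList

def supportsTLS_alt (inside_brackets : List String) (outside_brackets : List String) : Bool :=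
  !(inside_brackets.any hasABBA_B) && outside_brackets.any hasABBA_B

-- ===== PRECONDITION & SPEC =====
def Spec_supportsTLS (inside_brackets : List String) (outside_brackets : List String) (out : Bool) : Prop := out = supportsTLS_alt inside_brackets outside_brackets
instance (inside_brackets : List String) (outside_brackets : List String) (out : Bool) : Decidable (Spec_supportsTLS inside_brackets outside_brackets out) := by unfold Spec_supportsTLS; infer_instance

-- ===== CLAIM (what is proved, stated in full; the proofs are below) =====
def Claim_equal_supportsTLS : Prop := ∀ (inside_brackets : List String) (outside_brackets : List String), Dom_supportsTLS inside_brackets outside_brackets → Spec_supportsTLS inside_brackets outside_brackets (supportsTLS inside_brackets outside_brackets)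

-- ===== LEMMAS AND PROOFS =====

-- the boolean condition on indices, as A checks it at index i (window starts at i-1)
def condIdx (l : List Char) (i : Nat) : Bool :=
  (l.getD i ' ' == l.getD (i+1) ' ') && (l.getD (i-1) ' ' == l.getD (i+2) ' ') &&
  !(l.getD i ' ' == l.getD (i-1) ' ')

-- the condition B's regex checks at window start k
def condWin (l : List Char) (k : Nat) : Bool :=
  (!(l.getD k ' ' == l.getD (k+1) ' ')) && (l.getD (k+1) ' ' == l.getD (k+2) ' ') &&
  (l.getD k ' ' == l.getD (k+3) ' ')

lemma hasABBA_loop_iff_aux (l : List Char) (n : Nat) : ∀ i, l.length - i ≤ n →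
    (hasABBA_loop l i = true ↔ ∃ j, i ≤ j ∧ 0 < j ∧ j + 2 < l.length ∧ condIdx l j = true) := by
  induction n with
  | zero =>
    intro i hi
    rw [hasABBA_loop, if_neg (by omega)]
    constructor
    · intro h; exact absurd h (by simp)
    · rintro ⟨j, hj1, hj2, hj3, _⟩; omega
  | succ n ih =>
    intro i hi
    rw [hasABBA_loop]
    by_cases hlen : i < l.length
    · simp only [hlen, if_true]
      by_cases hguard : ((decide (0 < i) && decide (i < l.length - 2)) &&
          ((l.getD i ' ' == l.getD (i+1) ' ') && (l.getD (i-1) ' ' == l.getD (i+2) ' ') &&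
           !(l.getD i ' ' == l.getD (i-1) ' '))) = true
      · rw [if_pos hguard]
        rw [Bool.and_eq_true, Bool.and_eq_true, decide_eq_true_eq, decide_eq_true_eq] at hguard
        constructor
        · intro _
          exact ⟨i, le_refl i, hguard.1.1, by have := hguard.1.2; omega, hguard.2⟩
        · intro _; rfl
      · rw [if_neg hguard]
        rw [ih (i+1) (by omega)]
        constructor
        · rintro ⟨j, hj1, hj2, hj3, hj4⟩
          exact ⟨j, by omega, hj2, hj3, hj4⟩
        · rintro ⟨j, hj1, hj2, hj3, hj4⟩
          refine ⟨j, ?_, hj2, hj3, hj4⟩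
          rcases Nat.eq_or_lt_of_le hj1 with h | h
          · exfalso
            apply hguard
            rw [Bool.and_eq_true, Bool.and_eq_true, decide_eq_true_eq, decide_eq_true_eq]
            subst h
            exact ⟨⟨hj2, by omega⟩, hj4⟩
          · omega
    · simp only [hlen, if_false]
      constructor
      · intro h; exact absurd h (by simp)
      · rintro ⟨j, hj1, hj2, hj3, _⟩; omega

lemma hasABBA_loop_iff (l : List Char) (i : Nat) :
    hasABBA_loop l i = true ↔ ∃ j, i ≤ j ∧ 0 < j ∧ j + 2 < l.length ∧ condIdx l j = true :=
  hasABBA_loop_iff_aux l (l.length - i) i (le_refl _)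

lemma reSearchABBA_iff (l : List Char) :
    reSearchABBA l = true ↔ ∃ k, k + 3 < l.length ∧ condWin l k = true := by
  match l with
  | [] | [_] | [_, _] | [_, _, _] =>
    constructor
    · intro h; simp [reSearchABBA] at h
    · rintro ⟨k, hk, _⟩; simp at hk
  | a :: b :: c :: d :: tl =>
    have ih := reSearchABBA_iff (b :: c :: d :: tl)
    rw [reSearchABBA]
    by_cases hc : ((!(a == b)) && (b == c) && (a == d)) = true
    · rw [if_pos hc]
      constructor
      · intro _
        refine ⟨0, by simp, ?_⟩
        simpa [condWin, List.getD] using hc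
      · intro _; rfl
    · rw [if_neg hc, ih]
      constructor
      · rintro ⟨k, hk, hcond⟩
        refine ⟨k + 1, by simp at hk ⊢; omega, ?_⟩
        simpa [condWin, List.getD] using hcond
      · rintro ⟨k, hk, hcond⟩
        match k with
        | 0 =>
          exfalso; apply hc
          simpa [condWin, List.getD] using hcond
        | k' + 1 =>
          refine ⟨k', by simp at hk ⊢; omega, ?_⟩
          simpa [condWin, List.getD] using hcond
termination_by l.length

lemma beq_not_flip (a b : Char) (h : (!(a == b)) = true) : (!(b == a)) = true := by
  simp only [Bool.not_eq_true', beq_eq_false_iff_ne] at *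
  exact fun e => h e.symm

lemma hasABBA_eq (s : String) : hasABBA_A s = hasABBA_B s := by
  rw [Bool.eq_iff_iff]
  unfold hasABBA_A hasABBA_B
  rw [hasABBA_loop_iff, reSearchABBA_iff]
  set l := s.toList
  constructor
  · rintro ⟨j, -, hj0, hjlen, hcond⟩
    refine ⟨j - 1, by omega, ?_⟩
    simp only [condIdx, Bool.and_eq_true] at hcond
    simp only [condWin, Bool.and_eq_true]
    have e1 : j - 1 + 1 = j := by omega
    have e2 : j - 1 + 2 = j + 1 := by omega
    have e3 : j - 1 + 3 = j + 2 := by omega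
    rw [e1, e2, e3]
    exact ⟨⟨beq_not_flip _ _ hcond.2, hcond.1.1⟩, hcond.1.2⟩
  · rintro ⟨k, hk, hcond⟩
    refine ⟨k + 1, by omega, by omega, by omega, ?_⟩
    simp only [condWin, Bool.and_eq_true] at hcond
    simp only [condIdx, Bool.and_eq_true]
    have e1 : k + 1 - 1 = k := by omega
    have e2 : k + 1 + 1 = k + 2 := by omega
    have e3 : k + 1 + 2 = k + 3 := by omega
    rw [e1, e2, e3]
    exact ⟨⟨hcond.1.2, hcond.2⟩, beq_not_flip _ _ hcond.1.1⟩

lemma tlsOutLoop_eq (outs : List String) : tlsOutLoop outs = outs.any hasABBA_B := by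
  induction outs with
  | nil => rfl
  | cons s rest ih =>
    rw [tlsOutLoop, List.any_cons, hasABBA_eq]
    by_cases h : hasABBA_B s <;> simp [h, ih]

lemma tls_eq (ins outs : List String) : supportsTLS ins outs = supportsTLS_alt ins outs := by
  induction ins with
  | nil =>
    simp [supportsTLS, supportsTLS_alt, tlsOutLoop_eq]
  | cons s rest ih =>
    rw [supportsTLS, hasABBA_eq]
    by_cases h : hasABBA_B s
    · simp [supportsTLS_alt, h]
    · simp only [h]
      rw [ih]
      simp [supportsTLS_alt, h]

-- ===== VERDICT (by name: the statement is the Claim_ definition above) =====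
theorem supportsTLS_spec : Claim_equal_supportsTLS := by
  intro ins outs _
  exact tls_eq ins outs
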